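-- pv_equiv track=rewrite | github.com/stolenricecakes/adventofcode | 2022/day10/day10.py | determine_image
-- ===== SOURCE A (Python) =====
-- def determine_image(instructions):
--     display = []
--     for i in range(1, 241):
--         register = sum(instructions[0:i-1])
--         horiz = (i - 1) % 40
--         if abs(horiz-register) <= 1:
--             display.append("#")
--         else:
--             display.append(".")
--
--     return display
-- ===== SOURCE B (Python) =====
-- def determine_image(instructions):
--     display = []
--     register = 0
--     it = iter(instructions)
--     for cycle in range(240):
--         display.append("#" if abs(cycle % 40 - register) <= 1 else ".")
--         register += next(it, 0)
--     return display
-- ===== Notes on version B (the rewrite author's own statement) =====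
-- stated objective: idiomatic
-- what changed: B keeps one running register updated once per cycle from a single pass over the instruction iterator, instead of re-summing the slice instructions[0:i-1] on every one of the 240 cycles.
import Mathlib
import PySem

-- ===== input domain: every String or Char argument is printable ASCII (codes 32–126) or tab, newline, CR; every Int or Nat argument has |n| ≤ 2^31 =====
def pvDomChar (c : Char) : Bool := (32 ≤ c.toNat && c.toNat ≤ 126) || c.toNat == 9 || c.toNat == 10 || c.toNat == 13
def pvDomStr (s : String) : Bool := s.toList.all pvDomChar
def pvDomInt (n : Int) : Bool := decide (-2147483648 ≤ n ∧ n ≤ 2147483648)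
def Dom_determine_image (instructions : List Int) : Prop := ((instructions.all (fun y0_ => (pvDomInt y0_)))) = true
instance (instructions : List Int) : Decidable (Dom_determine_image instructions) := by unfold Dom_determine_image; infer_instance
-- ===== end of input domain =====

-- B keeps a running register updated once per cycle (single pass over the instructions) instead of A's per-cycle re-summing of the slice instructions[0:i-1].


-- ===== PORT A =====
-- literal port of A: for i in range(1, 241): register = sum(instructions[0:i-1]); …
def determine_image (instructions : List Int) : List String :=
  (PySem.List.pyRange 1 241 1).foldl
    (fun display i =>
      let register := (PySem.List.slice instructions (some 0) (some (i - 1))).sum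
      let horiz := PySem.Int.mod (i - 1) 40
      if (horiz - register).natAbs ≤ 1 then display ++ ["#"] else display ++ ["."])
    []

-- ===== PORT B =====
-- literal port of B: the iterator 'it' is the not-yet-consumed suffix; next(it, 0) adds 0 when exhausted
def detAltStep (s : List String × Int × List Int) (c : Int) :
    List String × Int × List Int :=
  let display := s.1 ++ [if (PySem.Int.mod c 40 - s.2.1).natAbs ≤ 1 then "#" else "."]
  match s.2.2 with
  | [] => (display, s.2.1 + 0, [])
  | x :: rest => (display, s.2.1 + x, rest)

def determine_image_alt (instructions : List Int) : List String :=
  ((PySem.List.pyRange 0 240 1).foldl detAltStep ([], 0, instructions)).1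

-- ===== PRECONDITION & SPEC =====
def Spec_determine_image (instructions : List Int) (out : List String) : Prop := out = determine_image_alt instructions
instance (instructions : List Int) (out : List String) : Decidable (Spec_determine_image instructions out) := by unfold Spec_determine_image; infer_instance

-- ===== CLAIM (what is proved, stated in full; the proofs are below) =====
def Claim_equal_determine_image : Prop := ∀ (instructions : List Int), Dom_determine_image instructions → Spec_determine_image instructions (determine_image instructions)

-- ===== LEMMAS AND PROOFS =====

-- the pixel drawn at 0-based cycle c, given the register value sum(instructions[:c])
def pvPix (instructions : List Int) (c : Nat) : String :=
  if (PySem.Int.mod (c : Int) 40 - (instructions.take c).sum).natAbs ≤ 1 then "#" else "."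

lemma lemA (instructions : List Int) :
    ∀ (n a : Nat) (d : List String),
      (PySem.List.pyRange ((a : Int) + 1) ((a : Int) + (n : Int) + 1) 1).foldl
        (fun display i =>
          let register := (PySem.List.slice instructions (some 0) (some (i - 1))).sum
          let horiz := PySem.Int.mod (i - 1) 40
          if (horiz - register).natAbs ≤ 1 then display ++ ["#"] else display ++ ["."]) d
      = d ++ (List.range' a n).map (pvPix instructions) := by
  intro n
  induction n with
  | zero => intro a d; simp [pysem]
  | succ n ih =>
    intro a d
    rw [PySem.List.pyRange_one_cons (by push_cast; omega)]
    simp only [List.foldl_cons]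
    have hstep :
        (if (PySem.Int.mod ((a : Int) + 1 - 1) 40
              - (PySem.List.slice instructions (some 0) (some ((a : Int) + 1 - 1))).sum).natAbs ≤ 1
          then d ++ ["#"] else d ++ ["."])
        = d ++ [pvPix instructions a] := by
      rw [show (a : Int) + 1 - 1 = (a : Int) by ring]
      simp only [PySem.List.slice_zero_start, PySem.List.slice_to_natCast, pvPix]
      split <;> rfl
    rw [hstep]
    have htail := ih (a + 1) (d ++ [pvPix instructions a])
    push_cast at htail ⊢
    rw [show (a : Int) + 1 + 1 = (a : Int) + 1 + 1 by ring] at htail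
    rw [show (a : Int) + ((n : Int) + 1) + 1 = (a : Int) + 1 + (n : Int) + 1 by ring]
    rw [htail, List.range'_succ, List.map_cons, List.append_assoc]
    rfl

lemma lemB (instructions : List Int) :
    ∀ (n a : Nat) (d : List String),
      (PySem.List.pyRange (a : Int) ((a : Int) + (n : Int)) 1).foldl detAltStep
        (d, (instructions.take a).sum, instructions.drop a)
      = (d ++ (List.range' a n).map (pvPix instructions),
         (instructions.take (a + n)).sum, instructions.drop (a + n)) := by
  intro n
  induction n with
  | zero => intro a d; simp [pysem]
  | succ n ih =>
    intro a d
    rw [PySem.List.pyRange_one_cons (by push_cast; omega)]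
    simp only [List.foldl_cons]
    have hstep :
        detAltStep (d, (instructions.take a).sum, instructions.drop a) (a : Int)
        = (d ++ [pvPix instructions a], (instructions.take (a + 1)).sum,
           instructions.drop (a + 1)) := by
      unfold detAltStep pvPix
      cases h : instructions.drop a with
      | nil =>
        have hle : instructions.length ≤ a := by
          have := List.drop_eq_nil_iff.mp h; omega
        rw [List.take_of_length_le hle, List.take_of_length_le (by omega),
          List.drop_eq_nil_iff.mpr (by omega)]
        simp
      | cons x rest =>
        have hx : instructions[a]? = some x := by
          have := (List.getElem?_drop (xs := instructions) (i := a) (j := 0)).symm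
          simpa [h] using this
        have hrest : instructions.drop (a + 1) = rest := by
          rw [← List.drop_drop, h]; simp
        have hsum : (instructions.take (a + 1)).sum = (instructions.take a).sum + x := by
          rw [List.take_add_one]; simp [hx]
        simp only [hsum, hrest]
    rw [hstep]
    have htail := ih (a + 1) (d ++ [pvPix instructions a])
    push_cast at htail ⊢
    rw [show (a : Int) + ((n : Int) + 1) = (a : Int) + 1 + (n : Int) by ring]
    rw [htail, List.range'_succ, List.map_cons, List.append_assoc]
    rw [show a + (n + 1) = a + 1 + n by ring]
    rfl

-- ===== VERDICT (by name: the statement is the Claim_ definition above) =====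
theorem determine_image_spec : Claim_equal_determine_image := by
  intro instructions _
  unfold Spec_determine_image determine_image determine_image_alt
  have hA := lemA instructions 240 0 []
  have hB := lemB instructions 240 0 []
  norm_num at hA hB
  rw [hB]
  simpa using hA
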